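-- pv_equiv track=rewrite | github.com/micheltsarasoa/ragapp | main.py | _truncate_contexts
-- ===== SOURCE A (Python) =====
-- _MAX_CONTEXT_CHARS = 4096 * 4  # ~4 096 tokens at ~4 chars/token
--
-- def _truncate_contexts(contexts: list[str]) -> list[str]:
--     """Return as many context chunks as fit within the character budget."""
--     result, used = [], 0
--     for ctx in contexts:
--         if used + len(ctx) > _MAX_CONTEXT_CHARS:
--             break
--         result.append(ctx)
--         used += len(ctx)
--     return result
-- ===== SOURCE B (Python) =====
-- _MAX_CONTEXT_CHARS = 4096 * 4  # ~4 096 tokens at ~4 chars/token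
--
-- def _truncate_contexts(contexts: list[str]) -> list[str]:
--     """Return as many context chunks as fit within the character budget."""
--     totals, t = [], 0
--     for ctx in contexts:
--         t += len(ctx)
--         totals.append(t)
--     k = sum(1 for s in totals if s <= _MAX_CONTEXT_CHARS)
--     return contexts[:k]
-- ===== Notes on version B (the rewrite author's own statement) =====
-- stated objective: alternative
-- what changed: Replaces the scalar-accumulator early-break scan with a prefix-sum table over chunk lengths followed by a count of cumulative sums within budget and a single slice; monotonicity of the sums makes the cutoff identical.
import Mathlib
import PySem

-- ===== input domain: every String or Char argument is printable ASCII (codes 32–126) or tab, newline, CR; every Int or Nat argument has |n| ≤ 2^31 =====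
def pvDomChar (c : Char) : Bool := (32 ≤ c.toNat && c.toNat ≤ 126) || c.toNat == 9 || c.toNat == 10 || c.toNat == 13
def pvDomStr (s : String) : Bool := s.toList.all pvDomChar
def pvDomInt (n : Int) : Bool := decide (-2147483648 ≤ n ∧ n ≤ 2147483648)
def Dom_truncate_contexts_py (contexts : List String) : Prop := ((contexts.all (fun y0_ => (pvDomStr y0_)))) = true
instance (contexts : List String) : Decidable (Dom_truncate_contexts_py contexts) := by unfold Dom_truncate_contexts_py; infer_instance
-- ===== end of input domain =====

-- ===== PORT A =====
-- B differs from A: A early-breaks a scalar accumulator; B builds a prefix-sum table, counts sums within budget, and slices (alternative decomposition, same cost).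
def pvMaxContextChars : Int := 4096 * 4

-- the for-loop of A: 'used' is the accumulator; append becomes cons-building recursion
def pvGoA (used : Int) : List String → List String
  | [] => []
  | ctx :: rest =>
    if used + PySem.Str.len ctx > pvMaxContextChars then []
    else ctx :: pvGoA (used + PySem.Str.len ctx) rest

def truncate_contexts_py (contexts : List String) : List String :=
  pvGoA 0 contexts

-- ===== PORT B =====
-- the first loop of B: running total t, totals list built front-to-back
def pvTotals (t : Int) : List String → List Int
  | [] => []
  | ctx :: rest => (t + PySem.Str.len ctx) :: pvTotals (t + PySem.Str.len ctx) rest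

def truncate_contexts_py_alt (contexts : List String) : List String :=
  let totals := pvTotals 0 contexts
  let k := totals.countP (fun s => decide (s ≤ pvMaxContextChars))
  contexts.take k

-- ===== PRECONDITION & SPEC =====
def Spec_truncate_contexts_py (contexts : List String) (out : List String) : Prop := out = truncate_contexts_py_alt contexts
instance (contexts : List String) (out : List String) : Decidable (Spec_truncate_contexts_py contexts out) := by unfold Spec_truncate_contexts_py; infer_instance

-- ===== CLAIM (what is proved, stated in full; the proofs are below) =====
def Claim_equal_truncate_contexts_py : Prop := ∀ (contexts : List String), Dom_truncate_contexts_py contexts → Spec_truncate_contexts_py contexts (truncate_contexts_py contexts)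

-- ===== LEMMAS AND PROOFS =====
-- every cumulative sum starting at t is ≥ t (lengths are non-negative)
theorem pv_mem_totals_ge (cs : List String) : ∀ (t x : Int), x ∈ pvTotals t cs → t ≤ x := by
  induction cs with
  | nil => intro t x h; simp [pvTotals] at h
  | cons c rest ih =>
    intro t x h
    have hl : (0 : Int) ≤ PySem.Str.len c := by
      rw [PySem.Str.len_eq]; positivity
    simp only [pvTotals, List.mem_cons] at h
    rcases h with rfl | h
    · omega
    · have := ih (t + PySem.Str.len c) x h
      omega

theorem pv_goA_eq_take (cs : List String) : ∀ (t : Int),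
    pvGoA t cs = cs.take ((pvTotals t cs).countP (fun s => decide (s ≤ pvMaxContextChars))) := by
  induction cs with
  | nil => intro t; simp [pvGoA, pvTotals]
  | cons c rest ih =>
    intro t
    by_cases h : t + PySem.Str.len c > pvMaxContextChars
    · have hz : (pvTotals t (c :: rest)).countP (fun s => decide (s ≤ pvMaxContextChars)) = 0 := by
        rw [List.countP_eq_zero]
        intro x hx
        simp only [decide_eq_true_eq]
        simp only [pvTotals, List.mem_cons] at hx
        have hl : (0 : Int) ≤ PySem.Str.len c := by
          rw [PySem.Str.len_eq]; positivity
        rcases hx with rfl | hx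
        · omega
        · have := pv_mem_totals_ge rest (t + PySem.Str.len c) x hx
          omega
      rw [hz]; simp only [List.take_zero, pvGoA, if_pos h]
    · have hle : decide (t + PySem.Str.len c ≤ pvMaxContextChars) = true := by
        simp only [decide_eq_true_eq]; omega
      simp only [pvGoA, pvTotals, if_neg h, List.countP_cons, hle, if_pos]
      rw [ih (t + PySem.Str.len c)]
      simp [List.take_succ_cons]

-- ===== VERDICT (by name: the statement is the Claim_ definition above) =====
theorem truncate_contexts_py_spec : Claim_equal_truncate_contexts_py := by
  intro contexts _
  unfold Spec_truncate_contexts_py truncate_contexts_py truncate_contexts_py_alt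
  exact pv_goA_eq_take contexts 0
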